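-- pv_equiv track=rewrite | github.com/hanglider/ACMP | 289.py | F
-- ===== SOURCE A (Python) =====
-- def F(n):
--     def b(r, c, s=2):
--         if r == 1:
--             f.append(list(c))
--             return
--         for i in range(s, n + 1):
--             if r % i == 0:
--                 c.append(i)
--                 b(r // i, c, i)
--                 c.pop()
--
--     f = []
--     b(n, [])
--     return f
-- ===== SOURCE B (Python) =====
-- def F(n):
--     # Bottom-up dynamic programming over the divisors of n instead of recursive
--     # backtracking: table[r] holds all non-decreasing factorizations of the
--     # divisor r, built from smaller divisors already in the table.
--     divs = [d for d in range(2, n + 1) if n % d == 0]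
--     table = {1: [[]]}
--     for r in divs:
--         table[r] = [[d] + t
--                     for d in divs
--                     if r % d == 0 and d <= r
--                     for t in table[r // d]
--                     if not t or d <= t[0]]
--     return table.get(n, [])
-- ===== Notes on version B (the rewrite author's own statement) =====
-- stated objective: faster
-- what changed: B replaces A's recursive backtracking (which rescans range(2, n+1) at every search node) by bottom-up dynamic programming: it iterates once over the ascending divisors of n, storing in a table for each divisor r the list of its non-decreasing factorizations assembled from already-tabulated smaller divisors, and returns table[n].
import Mathlib
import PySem

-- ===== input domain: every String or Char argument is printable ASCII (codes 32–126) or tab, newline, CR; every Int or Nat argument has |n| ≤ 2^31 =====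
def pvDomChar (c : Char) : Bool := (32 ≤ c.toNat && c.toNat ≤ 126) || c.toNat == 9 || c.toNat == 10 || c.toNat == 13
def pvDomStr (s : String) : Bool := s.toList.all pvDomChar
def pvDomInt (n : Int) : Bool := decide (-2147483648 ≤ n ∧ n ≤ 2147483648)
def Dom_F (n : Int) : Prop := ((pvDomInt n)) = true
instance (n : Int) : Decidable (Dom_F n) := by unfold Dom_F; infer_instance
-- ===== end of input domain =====

-- B replaces A's recursive backtracking over range(2, n+1) by bottom-up dynamic
-- programming over the divisors of n (a table of factorizations per divisor): faster.

-- ===== PORT A =====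
-- A's inner recursion b(r, c, s); fuel only makes the recursion total: on every
-- reachable call r/i < r, so fuel n.toNat+1 is never exhausted.
def FbA (n : Int) : Nat → Int → List Int → Int → List (List Int)
  | 0, _, _, _ => []
  | fuel+1, r, c, s =>
    if r = 1 then [c]
    else (PySem.List.pyRange s (n+1) 1).foldl
      (fun acc i => if PySem.Int.mod r i = 0 then
          acc ++ FbA n fuel (PySem.Int.floordiv r i) (c ++ [i]) i
        else acc) []

def F (n : Int) : List (List Int) := FbA n (n.toNat + 1) n [] 2

-- ===== PORT B =====
-- Source B: divisor list, then one pass filling the DP table, then table.get(n, []).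
-- Python's 'not t or d <= t[0]' is 't = [] ∨ d ≤ t.headD 0' (t[0] only read when t ≠ []).
def F_alt (n : Int) : List (List Int) :=
  let divs := (PySem.List.pyRange 2 (n+1) 1).filter (fun d => PySem.Int.mod n d == 0)
  let table := divs.foldl (fun table r =>
      table.insert r (divs.foldl (fun acc d =>
        if PySem.Int.mod r d = 0 ∧ d ≤ r then
          acc ++ (table.getD (PySem.Int.floordiv r d) []).foldl
            (fun acc2 t => if t = [] ∨ d ≤ t.headD 0 then acc2 ++ [d :: t] else acc2) []
        else acc) []))
    ((PySem.Dict.empty : PySem.Dict Int (List (List Int))).insert 1 [[]])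
  table.getD n []

-- ===== PRECONDITION & SPEC =====
def Spec_F (n : Int) (out : List (List Int)) : Prop := out = F_alt n
instance (n : Int) (out : List (List Int)) : Decidable (Spec_F n out) := by unfold Spec_F; infer_instance

-- ===== CLAIM (what is proved, stated in full; the proofs are below) =====
def Claim_equal_F : Prop := ∀ (n : Int), Dom_F n → Spec_F n (F n)

-- ===== LEMMAS AND PROOFS =====

-- Reference function: Gt fuel r = the non-decreasing factorizations of r, in
-- the lexicographic order both programs produce.
def Gt : Nat → Int → List (List Int)
  | 0, _ => []
  | fuel+1, r =>
    if r = 1 then [[]]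
    else ((PySem.List.pyRange 2 (r+1) 1).filter (fun d => decide (d ∣ r))).foldl
      (fun acc d => acc ++ ((Gt fuel (PySem.Int.floordiv r d)).filter
          (fun t => decide (t = [] ∨ d ≤ t.headD 0))).map (d :: ·)) []

def G (r : Int) : List (List Int) := Gt r.toNat r

-- divisors of r with 2 ≤ d, as both programs see them
def cands (r : Int) : List Int :=
  (PySem.List.pyRange 2 (r+1) 1).filter (fun d => decide (d ∣ r))

lemma Gt_succ (fuel : Nat) (r : Int) (hr : r ≠ 1) :
    Gt (fuel+1) r = (cands r).flatMap
      (fun d => ((Gt fuel (PySem.Int.floordiv r d)).filter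
          (fun t => decide (t = [] ∨ d ≤ t.headD 0))).map (d :: ·)) := by
  rw [Gt, if_neg hr, PySem.List.foldl_append_eq_flatMap, List.nil_append]; rfl

lemma mem_cands {r d : Int} : d ∈ cands r ↔ 2 ≤ d ∧ d < r + 1 ∧ d ∣ r := by
  simp [cands, PySem.List.mem_pyRange_one, and_assoc]

lemma cands_extend (r b : Int) (hr : 1 ≤ r) (hb : r ≤ b) :
    (PySem.List.pyRange 2 (b+1) 1).filter (fun d => decide (d ∣ r)) = cands r := by
  unfold cands
  rw [PySem.List.pyRange_one_append 2 (r+1) (b+1) (by omega) (by omega), List.filter_append]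
  have h0 : (PySem.List.pyRange (r+1) (b+1) 1).filter (fun d => decide (d ∣ r)) = [] := by
    rw [List.filter_eq_nil_iff]
    intro x hx
    have hxm := PySem.List.mem_pyRange_one.1 hx
    simp only [decide_eq_true_eq]
    intro hdvd
    have := Int.le_of_dvd (by omega) hdvd
    omega
  rw [h0, List.append_nil]

lemma candA (n r s : Int) (hr : 1 ≤ r) (hn : r ≤ n) (hs : 2 ≤ s) :
    (PySem.List.pyRange s (n+1) 1).filter (fun i => decide (PySem.Int.mod r i = 0)) =
    (cands r).filter (fun d => decide (s ≤ d)) := by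
  rw [← cands_extend r n hr hn, List.filter_filter]
  by_cases hb : s ≤ n + 1
  · rw [PySem.List.pyRange_one_append 2 s (n+1) (by omega) hb, List.filter_append]
    have h0 : (PySem.List.pyRange 2 s 1).filter (fun a => decide (s ≤ a) && decide (a ∣ r)) = [] := by
      rw [List.filter_eq_nil_iff]
      intro x hx
      have hxm := PySem.List.mem_pyRange_one.1 hx
      simp; omega
    rw [h0, List.nil_append]
    apply List.filter_congr
    intro x hx
    have hxm := PySem.List.mem_pyRange_one.1 hx
    simp [PySem.Int.mod_eq_zero_iff_dvd]
    omega
  · rw [PySem.List.pyRange_one_eq_nil (by omega : (n:Int) + 1 ≤ s), List.filter_nil,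
      Eq.comm, List.filter_eq_nil_iff]
    intro x hx
    have hxm := PySem.List.mem_pyRange_one.1 hx
    simp; omega

lemma Gt_stable : ∀ fuel fuel' r, 1 ≤ r → r.toNat ≤ fuel → r.toNat ≤ fuel' →
    Gt fuel r = Gt fuel' r := by
  intro fuel
  induction fuel with
  | zero => intro fuel' r hr h _; omega
  | succ f ih =>
    intro fuel' r hr h h'
    obtain ⟨f', rfl⟩ : ∃ f', fuel' = f' + 1 := ⟨fuel' - 1, by omega⟩
    by_cases h1 : r = 1
    · simp [Gt, h1]
    · rw [Gt_succ f r h1, Gt_succ f' r h1]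
      apply List.flatMap_congr
      intro d hd
      have hdm := mem_cands.1 hd
      obtain ⟨hd2, _, k, hk⟩ := hdm
      have hfd : PySem.Int.floordiv r d = k := by
        rw [PySem.Int.floordiv_eq_ediv_of_pos (by omega), hk,
          Int.mul_ediv_cancel_left _ (by omega)]
      have hk1 : 1 ≤ k := by nlinarith
      have hkr : k < r := by nlinarith
      rw [hfd, ih f' k hk1 (by omega) (by omega)]

lemma Gt_heads (fuel : Nat) (r : Int) (t : List Int) (ht : t ∈ Gt fuel r) :
    t = [] ∨ 2 ≤ t.headD 0 := by
  cases fuel with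
  | zero => simp [Gt] at ht
  | succ f =>
    by_cases h1 : r = 1
    · simp only [Gt, h1, if_pos, List.mem_singleton] at ht
      exact Or.inl ht
    · rw [Gt_succ f r h1, List.mem_flatMap] at ht
      obtain ⟨d, hd, ht⟩ := ht
      rw [List.mem_map] at ht
      obtain ⟨t', _, rfl⟩ := ht
      exact Or.inr (mem_cands.1 hd).1

-- pushing the s-filter and the prefix map through one layer of Gt
lemma step_layer (X : List (List Int)) (c : List Int) (d s : Int) :
    ((((X.filter (fun t => decide (t = [] ∨ d ≤ t.headD 0))).map (d :: ·)).filter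
        (fun t => decide (t = [] ∨ s ≤ t.headD 0))).map (c ++ ·))
    = if s ≤ d then
        ((X.filter (fun t => decide (t = [] ∨ d ≤ t.headD 0))).map ((c ++ [d]) ++ ·))
      else [] := by
  rw [List.filter_map]
  split_ifs with h
  · rw [show ((fun t => decide (t = [] ∨ s ≤ t.headD 0)) ∘ fun x => d :: x) = fun _ => true
      from funext fun t => by simp [h]]
    rw [List.filter_true, List.map_map]
    apply List.map_congr_left
    intro t _
    simp
  · rw [show ((fun t => decide (t = [] ∨ s ≤ t.headD 0)) ∘ fun x => d :: x) = fun _ => false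
      from funext fun t => by simp [h]]
    rw [List.filter_false, List.map_nil, List.map_nil]

lemma flatMap_guard (s : Int) (l : List Int) (g : Int → List (List Int)) :
    l.flatMap (fun d => if s ≤ d then g d else []) =
      (l.filter (fun d => decide (s ≤ d))).flatMap g := by
  induction l with
  | nil => rfl
  | cons x l ih =>
    by_cases h : s ≤ x <;>
      simp [List.flatMap_cons, h, ih]

-- A-side characterisation
lemma FbA_eq (n : Int) (hn : 1 ≤ n) : ∀ fuel r c s, r ∣ n → 1 ≤ r → 2 ≤ s →
    FbA n fuel r c s =
      ((Gt fuel r).filter (fun t => decide (t = [] ∨ s ≤ t.headD 0))).map (c ++ ·) := by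
  intro fuel
  induction fuel with
  | zero => intro r c s _ _ _; rfl
  | succ f ih =>
    intro r c s hrn hr hs
    by_cases h1 : r = 1
    · simp [FbA, Gt, h1]
    · simp only [FbA, if_neg h1]
      rw [PySem.List.foldl_ite_eq_foldl_filter,
        candA n r s hr (Int.le_of_dvd (by omega) hrn) hs,
        PySem.List.foldl_append_eq_flatMap, List.nil_append]
      rw [Gt_succ f r h1, List.filter_flatMap, List.map_flatMap]
      have hbody : ∀ d ∈ cands r,
          ((((Gt f (PySem.Int.floordiv r d)).filter
              (fun t => decide (t = [] ∨ d ≤ t.headD 0))).map (d :: ·)).filter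
              (fun t => decide (t = [] ∨ s ≤ t.headD 0))).map (c ++ ·)
          = if s ≤ d then FbA n f (PySem.Int.floordiv r d) (c ++ [d]) d else [] := by
        intro d hd
        obtain ⟨hd2, _, k, hk⟩ := mem_cands.1 hd
        have hfd : PySem.Int.floordiv r d = k := by
          rw [PySem.Int.floordiv_eq_ediv_of_pos (by omega), hk,
            Int.mul_ediv_cancel_left _ (by omega)]
        have hk1 : 1 ≤ k := by nlinarith
        have hkn : k ∣ n := dvd_trans ⟨d, by rw [hk]; ring⟩ hrn
        rw [step_layer, hfd, ← ih k (c ++ [d]) d hkn hk1 hd2]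
      rw [List.flatMap_congr hbody, flatMap_guard]

-- B-side: the value computed for a new table entry x is G x
lemma inner_eq (n x : Int) (tbl : PySem.Dict Int (List (List Int)))
    (hx2 : 2 ≤ x) (hxn : x ∣ n) (hxle : x ≤ n)
    (htbl : ∀ e, 1 ≤ e → e ∣ x → e < x → tbl.getD e [] = G e) :
    ((PySem.List.pyRange 2 (n+1) 1).filter (fun d => PySem.Int.mod n d == 0)).foldl
      (fun acc d =>
        if PySem.Int.mod x d = 0 ∧ d ≤ x then
          acc ++ (tbl.getD (PySem.Int.floordiv x d) []).foldl
            (fun acc2 t => if t = [] ∨ d ≤ t.headD 0 then acc2 ++ [d :: t] else acc2) []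
        else acc) [] = G x := by
  rw [PySem.List.foldl_ite_eq_foldl_filter, List.filter_filter]
  have hc : (PySem.List.pyRange 2 (n+1) 1).filter
      (fun d => decide (PySem.Int.mod x d = 0 ∧ d ≤ x) && (PySem.Int.mod n d == 0)) = cands x := by
    rw [← cands_extend x n (by omega) hxle]
    apply List.filter_congr
    intro d hd
    have hdm := PySem.List.mem_pyRange_one.1 hd
    simp only [PySem.Int.mod_eq_zero_iff_dvd]
    by_cases hdx : d ∣ x
    · simp [hdx, Int.le_of_dvd (show (0:Int) < x by omega) hdx,
        PySem.Int.mod_eq_zero_iff_dvd n d |>.2 (dvd_trans hdx hxn)]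
    · simp [hdx]
  rw [hc, PySem.List.foldl_append_eq_flatMap, List.nil_append]
  have hft : x.toNat = (x.toNat - 1) + 1 := by omega
  rw [G, hft, Gt_succ _ x (by omega)]
  apply List.flatMap_congr
  intro d hd
  obtain ⟨hd2, _, k, hk⟩ := mem_cands.1 hd
  have hfd : PySem.Int.floordiv x d = k := by
    rw [PySem.Int.floordiv_eq_ediv_of_pos (by omega), hk,
      Int.mul_ediv_cancel_left _ (by omega)]
  have hk1 : 1 ≤ k := by nlinarith
  have hkx : k < x := by nlinarith
  rw [hfd, PySem.List.foldl_ite_eq_foldl_filter,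
    PySem.List.foldl_append_singleton_eq_map, List.nil_append,
    htbl k hk1 ⟨d, by rw [hk]; ring⟩ hkx, G,
    Gt_stable k.toNat (x.toNat - 1) k hk1 le_rfl (by omega)]

lemma fold_inv (n : Int) : ∀ (L P : List Int) (tbl : PySem.Dict Int (List (List Int))),
    (PySem.List.pyRange 2 (n+1) 1).filter (fun d => PySem.Int.mod n d == 0) = P ++ L →
    (∀ r, tbl.getD r [] = if r = 1 ∨ r ∈ P then G r else []) →
    ∀ r, (L.foldl (fun table x =>
        table.insert x (((PySem.List.pyRange 2 (n+1) 1).filter (fun d => PySem.Int.mod n d == 0)).foldl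
          (fun acc d =>
            if PySem.Int.mod x d = 0 ∧ d ≤ x then
              acc ++ (table.getD (PySem.Int.floordiv x d) []).foldl
                (fun acc2 t => if t = [] ∨ d ≤ t.headD 0 then acc2 ++ [d :: t] else acc2) []
            else acc) [])) tbl).getD r []
      = if r = 1 ∨ r ∈ P ++ L then G r else [] := by
  intro L
  induction L with
  | nil =>
    intro P tbl _ hinv r
    simpa using hinv r
  | cons x L ih =>
    intro P tbl hdiv hinv r
    rw [List.foldl_cons]
    have hx : x ∈ (PySem.List.pyRange 2 (n+1) 1).filter (fun d => PySem.Int.mod n d == 0) := by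
      rw [hdiv]; simp
    obtain ⟨hxr, hxd⟩ := List.mem_filter.1 hx
    have hxm := PySem.List.mem_pyRange_one.1 hxr
    have hxn : x ∣ n := (PySem.Int.mod_eq_zero_iff_dvd n x).1 (by simpa using hxd)
    have hpair : ((PySem.List.pyRange 2 (n+1) 1).filter
        (fun d => PySem.Int.mod n d == 0)).Pairwise (· < ·) :=
      List.Pairwise.filter _ (PySem.List.pairwise_lt_pyRange_one 2 (n+1))
    rw [hdiv] at hpair
    have hLgt : ∀ y ∈ L, x < y := by
      have := (List.pairwise_append.1 hpair).2.1
      exact (List.pairwise_cons.1 this).1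
    have hnew : ∀ r', ((tbl.insert x (((PySem.List.pyRange 2 (n+1) 1).filter
          (fun d => PySem.Int.mod n d == 0)).foldl
          (fun acc d =>
            if PySem.Int.mod x d = 0 ∧ d ≤ x then
              acc ++ (tbl.getD (PySem.Int.floordiv x d) []).foldl
                (fun acc2 t => if t = [] ∨ d ≤ t.headD 0 then acc2 ++ [d :: t] else acc2) []
            else acc) [])).getD r' [])
        = if r' = 1 ∨ r' ∈ P ++ [x] then G r' else [] := by
      intro r'
      rw [PySem.Dict.getD_insert]
      by_cases hrx : r' = x
      · subst hrx
        rw [if_pos rfl, if_pos (Or.inr (by simp))]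
        apply inner_eq n r' tbl (by omega) hxn (by omega)
        intro e he1 hex hel
        rw [hinv e]
        by_cases he : e = 1
        · simp [he]
        · rw [if_pos]
          right
          have hen : e ∈ (PySem.List.pyRange 2 (n+1) 1).filter
              (fun d => PySem.Int.mod n d == 0) := by
            rw [List.mem_filter]
            have hed : e ∣ n := dvd_trans hex hxn
            refine ⟨PySem.List.mem_pyRange_one.2 ⟨by omega, ?_⟩, by
              simpa using (PySem.Int.mod_eq_zero_iff_dvd n e).2 hed⟩
            have := Int.le_of_dvd (by omega) hed
            omega
          rw [hdiv] at hen
          rcases List.mem_append.1 hen with h | h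
          · exact h
          · rcases List.mem_cons.1 h with h' | h'
            · omega
            · exact absurd (hLgt e h') (by omega)
      · rw [if_neg hrx, hinv r']
        have : (r' = 1 ∨ r' ∈ P) ↔ (r' = 1 ∨ r' ∈ P ++ [x]) := by
          simp [hrx]
        simp only [this]
    have := ih (P ++ [x]) _ (by rw [hdiv]; simp) hnew r
    simpa using this

lemma F_alt_eq (n : Int) :
    F_alt n = if n = 1 ∨ n ∈ (PySem.List.pyRange 2 (n+1) 1).filter (fun d => PySem.Int.mod n d == 0)
      then G n else [] := by
  have hinit : ∀ r, ((PySem.Dict.empty : PySem.Dict Int (List (List Int))).insert 1 [[]]).getD r []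
      = if r = 1 ∨ r ∈ ([] : List Int) then G r else [] := by
    intro r
    rw [PySem.Dict.getD_insert]
    by_cases hr : r = 1
    · simp [hr, G, Gt]
    · simp [hr, PySem.Dict.getD_empty]
  have h := fold_inv n ((PySem.List.pyRange 2 (n+1) 1).filter (fun d => PySem.Int.mod n d == 0))
    [] ((PySem.Dict.empty : PySem.Dict Int (List (List Int))).insert 1 [[]])
    (by simp) hinit n
  simpa [F_alt] using h

-- ===== VERDICT (by name: the statement is the Claim_ definition above) =====
theorem F_spec : Claim_equal_F := by
  intro n _
  unfold Spec_F
  rw [F_alt_eq]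
  by_cases hn1 : 1 ≤ n
  · have hF : F n = G n := by
      unfold F
      rw [FbA_eq n hn1 (n.toNat+1) n [] 2 dvd_rfl hn1 le_rfl,
        Gt_stable (n.toNat+1) n.toNat n hn1 (by omega) le_rfl]
      rw [List.filter_eq_self.2 (fun t ht => by
        simp only [decide_eq_true_eq]
        exact Gt_heads n.toNat n t ht)]
      simp [G]
    rw [hF]
    by_cases h1 : n = 1
    · simp [h1]
    · rw [if_pos (Or.inr (List.mem_filter.2 ⟨PySem.List.mem_pyRange_one.2 ⟨by omega, by omega⟩,
        by simpa using (PySem.Int.mod_eq_zero_iff_dvd n n).2 dvd_rfl⟩))]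
  · have h0 : F n = [] := by
      unfold F
      have ht : n.toNat + 1 = 1 := by omega
      rw [ht]
      simp only [FbA]
      rw [if_neg (by omega), PySem.List.pyRange_one_eq_nil (by omega)]
      rfl
    rw [h0, if_neg]
    rintro (h | h)
    · omega
    · rw [PySem.List.pyRange_one_eq_nil (by omega : n + 1 ≤ 2)] at h
      simp at h
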